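-- pv_equiv track=rewrite | github.com/pedrocarlo/leetcode | src/citadel/social_media_suggestions.py | getRecommendedFriends
-- ===== SOURCE A (Python) =====
-- from typing import List
--
-- def getRecommendedFriends(n: int, friendships: List[List[int]]) -> List[int]:
--     adj: list[set[int]] = [set() for _ in range(n)]
--
--     for first, second in friendships:
--         adj[first].add(second)
--         adj[second].add(first)
--
--     # max common ancestor
--     def search_friend(root: int) -> int:
--         freq: dict[int, int] = dict()
--         friends = adj[root].copy()
--
--         for friend in friends:
--             second_degree_friends = adj[friend]
--
--             for second_friend in second_degree_friends:
--                 if second_friend != root and second_friend not in friends: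
--                     if second_friend not in freq:
--                         freq[second_friend] = 0
--                     freq[second_friend] += 1
--
--         max_rec_count = 0
--         max_rec_idx = -1
--         for rec, count in freq.items():
--             if count > max_rec_count:
--                 max_rec_count = count
--                 max_rec_idx = rec
--             elif count == max_rec_count and rec < max_rec_idx:
--                 max_rec_count = count
--                 max_rec_idx = rec
--
--         return max_rec_idx if max_rec_idx >= 0 else -1
--
--     return [search_friend(user) for user in range(n)]
-- ===== SOURCE B (Python) =====
-- def getRecommendedFriends(n, friendships):
--     adj = [set() for _ in range(n)]
--     for a, b in friendships:
--         adj[a].add(b)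
--         adj[b].add(a)
--     # tabulate mutual-friend counts once, pivoting on the shared friend m
--     mutual = [dict() for _ in range(n)]
--     for m in range(n):
--         nbrs = adj[m]
--         for a in nbrs:
--             row = mutual[a]
--             for b in nbrs:
--                 if b != a:
--                     row[b] = row.get(b, 0) + 1
--     result = []
--     for u in range(n):
--         best = (0, -1)
--         for v, c in mutual[u].items():
--             if v != u and v not in adj[u]:
--                 cand = (-c, v)
--                 if cand < best:
--                     best = cand
--         result.append(best[1])
--     return result
-- ===== Notes on version B (the rewrite author's own statement) =====
-- stated objective: alternative
-- what changed: Instead of expanding two hops from every root and tallying a per-root freq dict with a manual max/tie loop, B pivots on the shared friend: it tabulates all mutual-friend counts once into a per-user table mutual[u][v], then selects each user's answer by a lexicographic (-count, candidate) minimum over that row.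
-- outside the precondition, e.g. on getRecommendedFriends(2, [[0, -1], [0, -2]]): A returns [-1, -1], B returns [-1, -2]
import Mathlib
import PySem

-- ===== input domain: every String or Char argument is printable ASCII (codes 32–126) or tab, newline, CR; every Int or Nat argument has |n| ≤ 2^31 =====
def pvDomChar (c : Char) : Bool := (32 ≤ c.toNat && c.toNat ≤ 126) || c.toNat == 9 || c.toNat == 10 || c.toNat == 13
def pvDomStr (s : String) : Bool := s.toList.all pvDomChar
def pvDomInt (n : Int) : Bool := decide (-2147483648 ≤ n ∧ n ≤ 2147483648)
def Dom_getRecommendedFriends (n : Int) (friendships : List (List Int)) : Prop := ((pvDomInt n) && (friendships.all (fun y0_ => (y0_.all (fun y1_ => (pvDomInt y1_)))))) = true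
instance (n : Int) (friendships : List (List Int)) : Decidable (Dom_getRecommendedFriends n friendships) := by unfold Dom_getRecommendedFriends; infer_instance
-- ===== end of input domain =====

-- B replaces A's per-root two-hop expansion (freq dict + manual max/tie loop per user) by one global
-- tabulation of mutual-friend counts pivoted on the shared friend, followed by a lexicographic
-- (-count, candidate) minimum per user; same cost class, different decomposition ("alternative").
-- Python set/dict ITERATION order is not modelled; both results are proved order-independent here,
-- matching the Python outputs, whose values do not depend on that order either.

-- ===== PORT A =====
-- adj[i] accessed/updated with Python list-index semantics; Pre_ keeps indices in [0, n),
-- where Python neither raises nor wraps.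
def pvAdjStepA (adj : List (PySem.Set Int)) (f : List Int) : List (PySem.Set Int) :=
  match f with
  | [a, b] =>
      let adj1 := PySem.List.pySetD adj a (PySem.Set.add (PySem.List.pyGetD adj a PySem.Set.empty) b)
      PySem.List.pySetD adj1 b (PySem.Set.add (PySem.List.pyGetD adj1 b PySem.Set.empty) a)
  | _ => adj  -- Python raises ValueError (unpacking) here; excluded by Pre_

def pvBuildAdjA (n : Int) (friendships : List (List Int)) : List (PySem.Set Int) :=
  friendships.foldl pvAdjStepA (List.replicate n.toNat PySem.Set.empty)

-- `if second not in freq: freq[second] = 0` then `freq[second] += 1`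
def pvFreqInsA (freq : PySem.Dict Int Int) (x : Int) : PySem.Dict Int Int :=
  let freq := if freq.contains x then freq else freq.insert x 0
  freq.insert x (freq.getD x 0 + 1)

def pvSearchFriend (adj : List (PySem.Set Int)) (root : Int) : Int :=
  let friends := PySem.List.pyGetD adj root PySem.Set.empty
  let freq : PySem.Dict Int Int :=
    friends.foldl (fun freq friend =>
      (PySem.List.pyGetD adj friend PySem.Set.empty).foldl (fun freq second =>
        if second ≠ root ∧ second ∉ friends then pvFreqInsA freq second else freq) freq)
      PySem.Dict.empty
  let sel := freq.items.foldl (fun (st : Int × Int) p =>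
      if p.2 > st.1 then (p.2, p.1)
      else if p.2 = st.1 ∧ p.1 < st.2 then (p.2, p.1)
      else st) (0, -1)
  if sel.2 ≥ 0 then sel.2 else -1

def getRecommendedFriends (n : Int) (friendships : List (List Int)) : List Int :=
  let adj := pvBuildAdjA n friendships
  (PySem.List.pyRange 0 n 1).map (fun user => pvSearchFriend adj user)

-- ===== PORT B =====
def pvAdjStepB (adj : List (PySem.Set Int)) (f : List Int) : List (PySem.Set Int) :=
  match f with
  | [a, b] =>
      let adj1 := PySem.List.pySetD adj a (PySem.Set.add (PySem.List.pyGetD adj a PySem.Set.empty) b)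
      PySem.List.pySetD adj1 b (PySem.Set.add (PySem.List.pyGetD adj1 b PySem.Set.empty) a)
  | _ => adj

def pvBuildAdjB (n : Int) (friendships : List (List Int)) : List (PySem.Set Int) :=
  friendships.foldl pvAdjStepB (List.replicate n.toNat PySem.Set.empty)

-- inner loop of the tabulation: `row[b] = row.get(b, 0) + 1` for every neighbour b ≠ a
def pvRowUpd (row : PySem.Dict Int Int) (a : Int) (nbrs : PySem.Set Int) : PySem.Dict Int Int :=
  nbrs.foldl (fun row b => if b ≠ a then row.insert b (row.getD b 0 + 1) else row) row

-- one pivot node m: each neighbour a's row gains all other neighbours of m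
def pvMutualStep (adj : List (PySem.Set Int)) (tbl : List (PySem.Dict Int Int)) (m : Int) :
    List (PySem.Dict Int Int) :=
  let nbrs := PySem.List.pyGetD adj m PySem.Set.empty
  nbrs.foldl (fun tbl a =>
    PySem.List.pySetD tbl a
      (pvRowUpd (PySem.List.pyGetD tbl a PySem.Dict.empty) a nbrs)) tbl

def pvSelect (adj : List (PySem.Set Int)) (tbl : List (PySem.Dict Int Int)) (u : Int) : Int :=
  let friendsU := PySem.List.pyGetD adj u PySem.Set.empty
  let best := (PySem.List.pyGetD tbl u PySem.Dict.empty).items.foldl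
    (fun (best : Int × Int) p =>
      if p.1 ≠ u ∧ p.1 ∉ friendsU then
        (if -p.2 < best.1 ∨ (-p.2 = best.1 ∧ p.1 < best.2) then (-p.2, p.1) else best)
      else best) ((0 : Int), (-1 : Int))
  best.2

def getRecommendedFriends_alt (n : Int) (friendships : List (List Int)) : List Int :=
  let adj := pvBuildAdjB n friendships
  let tbl := (PySem.List.pyRange 0 n 1).foldl (pvMutualStep adj)
    (List.replicate n.toNat PySem.Dict.empty)
  (PySem.List.pyRange 0 n 1).map (fun u => pvSelect adj tbl u)

-- ===== PRECONDITION & SPEC =====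
-- Pre_ excludes friendship entries that are not pairs or have an index outside [0, n): Python A
-- raises there except for in-range NEGATIVE indices, where its silent index wraparound (and the
-- final `>= 0` guard collapsing negative winners to -1) is an accident of the implementation.
def Pre_getRecommendedFriends (n : Int) (friendships : List (List Int)) : Prop :=
  (friendships.all (fun f => f.length == 2 && f.all (fun x => decide (0 ≤ x) && decide (x < n)))) = true
instance (n : Int) (friendships : List (List Int)) : Decidable (Pre_getRecommendedFriends n friendships) := by unfold Pre_getRecommendedFriends; infer_instance

def pvWitness_getRecommendedFriends : Int × List (List Int) := (3, [[0, 1], [1, 2]])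

def Spec_getRecommendedFriends (n : Int) (friendships : List (List Int)) (out : List Int) : Prop := out = getRecommendedFriends_alt n friendships
instance (n : Int) (friendships : List (List Int)) (out : List Int) : Decidable (Spec_getRecommendedFriends n friendships out) := by unfold Spec_getRecommendedFriends; infer_instance

-- ===== CLAIM (what is proved, stated in full; the proofs are below) =====
def Claim_equal_getRecommendedFriends : Prop := ∀ (n : Int) (friendships : List (List Int)), Dom_getRecommendedFriends n friendships → Pre_getRecommendedFriends n friendships → Spec_getRecommendedFriends n friendships (getRecommendedFriends n friendships)

-- ===== LEMMAS AND PROOFS =====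

-- the (order-independent) lexicographic-minimum step both selection loops reduce to
def pvLexStep (best q : Int × Int) : Int × Int :=
  if q.1 < best.1 ∨ (q.1 = best.1 ∧ q.2 < best.2) then q else best

-- adj[i] / mutual[i] as values (defaulting out of range; all proved reads are in range)
def pvAg (adj : List (PySem.Set Int)) (i : Int) : PySem.Set Int :=
  PySem.List.pyGetD adj i PySem.Set.empty

def pvRow (tbl : List (PySem.Dict Int Int)) (i : Int) : PySem.Dict Int Int :=
  PySem.List.pyGetD tbl i PySem.Dict.empty

-- invariant of the adjacency structure both programs build: right length, neighbour sets
-- deduplicated with in-range members, and symmetric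
def pvAdjOK (n : Int) (adj : List (PySem.Set Int)) : Prop :=
  adj.length = n.toNat ∧
  (∀ i : Int, 0 ≤ i → i < n → (pvAg adj i).Nodup ∧ ∀ x ∈ pvAg adj i, 0 ≤ x ∧ x < n) ∧
  (∀ i j : Int, 0 ≤ i → i < n → 0 ≤ j → j < n → (j ∈ pvAg adj i ↔ i ∈ pvAg adj j))

-- the multiset A tallies for root u (two hops, filtered at insertion)
def pvSA (adj : List (PySem.Set Int)) (u : Int) : List Int :=
  (pvAg adj u).flatMap (fun m =>
    (pvAg adj m).filter (fun v => decide (v ≠ u ∧ v ∉ pvAg adj u)))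

-- the multiset B tallies into row u (pivot on the shared friend m)
def pvTB (adj : List (PySem.Set Int)) (n u : Int) : List Int :=
  (PySem.List.pyRange 0 n 1).flatMap (fun m =>
    if u ∈ pvAg adj m then (pvAg adj m).filter (fun v => decide (v ≠ u)) else [])

theorem pvAg_set (adj : List (PySem.Set Int)) (a i : Int) (v : PySem.Set Int)
    (ha0 : 0 ≤ a) (hi0 : 0 ≤ i) (hi1 : i < (adj.length : Int)) :
    pvAg (PySem.List.pySetD adj a v) i = if i = a then v else pvAg adj i := by
  rw [pvAg, pvAg, PySem.List.pySetD_of_nonneg adj v ha0,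
    PySem.List.pyGetD_eq_getElem _ _ hi0 (by simpa using hi1),
    PySem.List.pyGetD_eq_getElem _ _ hi0 (by simpa using hi1)]
  rw [List.getElem_set]
  by_cases h : i = a
  · simp [h]
  · have : ¬ a.toNat = i.toNat := by omega
    simp [h, this]

theorem pvStep_length (adj : List (PySem.Set Int)) (f : List Int) :
    (pvAdjStepA adj f).length = adj.length := by
  unfold pvAdjStepA
  match f with
  | [] => rfl
  | [_] => rfl
  | [a, b] => simp [PySem.List.length_pySetD]
  | _ :: _ :: _ :: _ => rfl

theorem pvStep_mem (adj : List (PySem.Set Int)) (a b i j : Int)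
    (ha0 : 0 ≤ a) (hb0 : 0 ≤ b) (hb1 : b < (adj.length : Int))
    (hi0 : 0 ≤ i) (hi1 : i < (adj.length : Int)) :
    (j ∈ pvAg (pvAdjStepA adj [a, b]) i ↔
      j ∈ pvAg adj i ∨ (i = a ∧ j = b) ∨ (i = b ∧ j = a)) := by
  show j ∈ pvAg (PySem.List.pySetD _ b _) i ↔ _
  have hl1 : (PySem.List.pySetD adj a (PySem.Set.add (PySem.List.pyGetD adj a PySem.Set.empty) b)).length = adj.length := PySem.List.length_pySetD _ _ _
  rw [pvAg_set _ b i _ hb0 hi0 (by rw [hl1]; exact hi1)]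
  rw [show (PySem.List.pyGetD (PySem.List.pySetD adj a (PySem.Set.add (PySem.List.pyGetD adj a PySem.Set.empty) b)) b PySem.Set.empty) = pvAg (PySem.List.pySetD adj a (PySem.Set.add (PySem.List.pyGetD adj a PySem.Set.empty) b)) b from rfl]
  rw [pvAg_set _ a b _ ha0 hb0 hb1, pvAg_set _ a i _ ha0 hi0 hi1]
  rw [show PySem.List.pyGetD adj a PySem.Set.empty = pvAg adj a from rfl]
  by_cases hib : i = b <;> by_cases hia : i = a <;>
    simp_all [PySem.Set.mem_add]

theorem pvStep_ag (adj : List (PySem.Set Int)) (a b i : Int)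
    (ha0 : 0 ≤ a) (hb0 : 0 ≤ b) (hb1 : b < (adj.length : Int))
    (hi0 : 0 ≤ i) (hi1 : i < (adj.length : Int)) :
    pvAg (pvAdjStepA adj [a, b]) i =
      if i = b then PySem.Set.add (if b = a then PySem.Set.add (pvAg adj a) b else pvAg adj b) a
      else if i = a then PySem.Set.add (pvAg adj a) b else pvAg adj i := by
  show pvAg (PySem.List.pySetD _ b _) i = _
  have hl1 : (PySem.List.pySetD adj a (PySem.Set.add (PySem.List.pyGetD adj a PySem.Set.empty) b)).length = adj.length := PySem.List.length_pySetD _ _ _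
  rw [pvAg_set _ b i _ hb0 hi0 (by rw [hl1]; exact hi1)]
  rw [show (PySem.List.pyGetD (PySem.List.pySetD adj a (PySem.Set.add (PySem.List.pyGetD adj a PySem.Set.empty) b)) b PySem.Set.empty) = pvAg (PySem.List.pySetD adj a (PySem.Set.add (PySem.List.pyGetD adj a PySem.Set.empty) b)) b from rfl]
  rw [pvAg_set _ a b _ ha0 hb0 hb1, pvAg_set _ a i _ ha0 hi0 hi1]
  rw [show PySem.List.pyGetD adj a PySem.Set.empty = pvAg adj a from rfl]

theorem pvAdjOK_init (n : Int) : pvAdjOK n (List.replicate n.toNat PySem.Set.empty) := by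
  have hag : ∀ i : Int, 0 ≤ i → i < n → pvAg (List.replicate n.toNat PySem.Set.empty) i = PySem.Set.empty := by
    intro i h0 h1
    rw [pvAg, PySem.List.pyGetD_eq_getElem _ _ h0 (by simp; omega), List.getElem_replicate]
  refine ⟨by simp, fun i h0 h1 => ?_, fun i j hi0 hi1 hj0 hj1 => ?_⟩
  · rw [hag i h0 h1]; exact ⟨List.nodup_nil, by simp [PySem.Set.empty]⟩
  · rw [hag i hi0 hi1, hag j hj0 hj1]
    simp [PySem.Set.empty]

theorem pvAdjOK_step (n : Int) (adj : List (PySem.Set Int)) (hOK : pvAdjOK n adj)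
    (a b : Int) (ha : 0 ≤ a ∧ a < n) (hb : 0 ≤ b ∧ b < n) :
    pvAdjOK n (pvAdjStepA adj [a, b]) := by
  obtain ⟨hlen, hel, hsym⟩ := hOK
  have hlb : b < (adj.length : Int) := by rw [hlen]; omega
  refine ⟨by rw [pvStep_length, hlen], fun i h0 h1 => ?_, fun i j hi0 hi1 hj0 hj1 => ?_⟩
  · have hli : i < (adj.length : Int) := by rw [hlen]; omega
    rw [pvStep_ag adj a b i ha.1 hb.1 hlb h0 hli]
    constructor
    · split_ifs <;>
        first
          | exact PySem.Set.nodup_add _ _ (PySem.Set.nodup_add _ _ (hel a ha.1 ha.2).1)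
          | exact PySem.Set.nodup_add _ _ (hel a ha.1 ha.2).1
          | exact PySem.Set.nodup_add _ _ (hel b hb.1 hb.2).1
          | exact (hel i h0 h1).1
    · intro x hx
      split_ifs at hx with h1' h2' h3'
      · rw [PySem.Set.mem_add] at hx
        rcases hx with hx | hx
        · rw [h2'] at hx; rw [PySem.Set.mem_add] at hx
          rcases hx with hx | hx
          · exact (hel a ha.1 ha.2).2 x hx
          · omega
        · omega
      · rw [PySem.Set.mem_add] at hx
        rcases hx with hx | hx
        · exact (hel b hb.1 hb.2).2 x hx
        · omega
      · rw [PySem.Set.mem_add] at hx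
        rcases hx with hx | hx
        · exact (hel a ha.1 ha.2).2 x hx
        · omega
      · exact (hel i h0 h1).2 x hx
  · have hli : i < (adj.length : Int) := by rw [hlen]; omega
    have hlj : j < (adj.length : Int) := by rw [hlen]; omega
    rw [pvStep_mem adj a b i j ha.1 hb.1 hlb hi0 hli,
      pvStep_mem adj a b j i ha.1 hb.1 hlb hj0 hlj,
      hsym i j hi0 hi1 hj0 hj1]
    tauto

theorem pvAdjOK_build (n : Int) (fs : List (List Int))
    (h : Pre_getRecommendedFriends n fs) : pvAdjOK n (pvBuildAdjA n fs) := by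
  rw [Pre_getRecommendedFriends, List.all_eq_true] at h
  rw [pvBuildAdjA]
  suffices H : ∀ (l : List (List Int)) (adj : List (PySem.Set Int)),
      (∀ f ∈ l, (f.length == 2 && f.all (fun x => decide (0 ≤ x) && decide (x < n))) = true) →
      pvAdjOK n adj → pvAdjOK n (l.foldl pvAdjStepA adj) by
    exact H fs _ h (pvAdjOK_init n)
  intro l
  induction l with
  | nil => intro adj _ hOK; exact hOK
  | cons f t ih =>
    intro adj hl hOK
    rw [List.foldl_cons]
    have hf := hl f List.mem_cons_self
    rw [Bool.and_eq_true, beq_iff_eq, List.all_eq_true] at hf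
    obtain ⟨hflen, hfel⟩ := hf
    have : ∃ a b : Int, f = [a, b] := by
      match f, hflen with
      | [a, b], _ => exact ⟨a, b, rfl⟩
    obtain ⟨a, b, rfl⟩ := this
    have ha := hfel a (by simp)
    have hb := hfel b (by simp)
    simp only [Bool.and_eq_true, decide_eq_true_eq] at ha hb
    exact ih _ (fun g hg => hl g (List.mem_cons_of_mem _ hg)) (pvAdjOK_step n adj hOK a b ha hb)

theorem pvLexStep_comm (b x y : Int × Int) :
    pvLexStep (pvLexStep b x) y = pvLexStep (pvLexStep b y) x := by
  obtain ⟨b1, b2⟩ := b; obtain ⟨x1, x2⟩ := x; obtain ⟨y1, y2⟩ := y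
  simp only [pvLexStep]
  split_ifs <;> simp_all <;> omega

theorem pvLexFold_perm (l₁ l₂ : List (Int × Int)) (h : l₁.Perm l₂) (b : Int × Int) :
    l₁.foldl pvLexStep b = l₂.foldl pvLexStep b := by
  induction h generalizing b with
  | nil => rfl
  | cons x _ ih => simp [List.foldl_cons, ih]
  | swap x y l => simp [List.foldl_cons, pvLexStep_comm]
  | trans _ _ ih1 ih2 => rw [ih1, ih2]

theorem pvLexFold_mem (l : List (Int × Int)) (b : Int × Int) :
    l.foldl pvLexStep b = b ∨ l.foldl pvLexStep b ∈ l := by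
  induction l generalizing b with
  | nil => left; rfl
  | cons x t ih =>
    rw [List.foldl_cons]
    rcases ih (pvLexStep b x) with h | h
    · rw [h]
      unfold pvLexStep
      split_ifs
      · right; simp
      · left; rfl
    · right; simp [h]

theorem pvFreqInsA_eq_modify (d : PySem.Dict Int Int) (x : Int) :
    pvFreqInsA d x = d.modify x 0 (· + 1) := by
  show PySem.Dict.insert _ _ _ = _
  unfold PySem.Dict.modify
  by_cases h : d.contains x
  · simp [h]
  · rw [Bool.not_eq_true] at h
    simp only [h, Bool.false_eq_true, if_false]
    rw [PySem.Dict.getD_insert_self, PySem.Dict.insert_insert_self,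
      PySem.Dict.getD_of_not_contains d 0 h]

theorem pvFoldA_conj (items : List (Int × Int)) (st : Int × Int) :
    items.foldl (fun (st : Int × Int) p =>
      if p.2 > st.1 then (p.2, p.1)
      else if p.2 = st.1 ∧ p.1 < st.2 then (p.2, p.1)
      else st) st
    = (fun r => ((-r.1, r.2) : Int × Int))
        ((items.map (fun p => ((-p.2, p.1) : Int × Int))).foldl pvLexStep (-st.1, st.2)) := by
  induction items generalizing st with
  | nil => simp
  | cons p t ih =>
    rw [List.foldl_cons, List.map_cons, List.foldl_cons, ih]
    congr 1
    obtain ⟨s1, s2⟩ := st; obtain ⟨p1, p2⟩ := p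
    simp only [pvLexStep]
    split_ifs <;> simp_all <;> omega

theorem pvSearchFriend_eq (adj : List (PySem.Set Int)) (u : Int) :
    pvSearchFriend adj u =
      (let r := (((PySem.Set.ofList (pvSA adj u)).map
          (fun k => ((-((pvSA adj u).count k : Int), k) : Int × Int))).foldl pvLexStep (0, -1));
       if r.2 ≥ 0 then r.2 else -1) := by
  unfold pvSearchFriend
  simp only [pvFreqInsA_eq_modify]
  have hfold : (PySem.List.pyGetD adj u PySem.Set.empty).foldl (fun freq friend =>
      (PySem.List.pyGetD adj friend PySem.Set.empty).foldl (fun freq second =>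
        if second ≠ u ∧ second ∉ PySem.List.pyGetD adj u PySem.Set.empty then
          freq.modify second 0 (· + 1) else freq) freq)
      PySem.Dict.empty = PySem.Dict.counter (pvSA adj u) := by
    rw [PySem.Dict.counter_eq_foldl, pvSA]
    rw [List.foldl_flatMap]
    simp only [List.foldl_filter, decide_eq_true_eq]
    rfl
  rw [hfold, PySem.Dict.items_counter, pvFoldA_conj]
  simp [List.map_map, Function.comp_def]

theorem pvRow_set (tbl : List (PySem.Dict Int Int)) (a i : Int) (v : PySem.Dict Int Int)
    (ha0 : 0 ≤ a) (hi0 : 0 ≤ i) (hi1 : i < (tbl.length : Int)) :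
    pvRow (PySem.List.pySetD tbl a v) i = if i = a then v else pvRow tbl i := by
  rw [pvRow, pvRow, PySem.List.pySetD_of_nonneg tbl v ha0,
    PySem.List.pyGetD_eq_getElem _ _ hi0 (by simpa using hi1),
    PySem.List.pyGetD_eq_getElem _ _ hi0 (by simpa using hi1)]
  rw [List.getElem_set]
  by_cases h : i = a
  · simp [h]
  · have : ¬ a.toNat = i.toNat := by omega
    simp [h, this]

theorem pvRow_fold_length (as : List Int) (nbrs : PySem.Set Int)
    (tbl : List (PySem.Dict Int Int)) :
    (as.foldl (fun tbl a => PySem.List.pySetD tbl a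
      (pvRowUpd (PySem.List.pyGetD tbl a PySem.Dict.empty) a nbrs)) tbl).length = tbl.length := by
  induction as generalizing tbl with
  | nil => rfl
  | cons a t ih => rw [List.foldl_cons, ih, PySem.List.length_pySetD]

theorem pvMutualStep_length (adj : List (PySem.Set Int)) (tbl : List (PySem.Dict Int Int)) (m : Int) :
    (pvMutualStep adj tbl m).length = tbl.length := pvRow_fold_length _ _ tbl

theorem pvInner_row (nbrs : PySem.Set Int)
    (u : Int) (hu0 : 0 ≤ u)
    (as : List Int) (hnd : as.Nodup) (hbd : ∀ a ∈ as, 0 ≤ a) :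
    ∀ tbl : List (PySem.Dict Int Int), u < (tbl.length : Int) →
    pvRow (as.foldl (fun tbl a => PySem.List.pySetD tbl a
      (pvRowUpd (PySem.List.pyGetD tbl a PySem.Dict.empty) a nbrs)) tbl) u =
      if u ∈ as then pvRowUpd (pvRow tbl u) u nbrs else pvRow tbl u := by
  induction as with
  | nil => intro tbl _; simp
  | cons a t ih =>
    intro tbl hlen
    rw [List.foldl_cons]
    have ha0 := hbd a List.mem_cons_self
    have hlen1 : u < ((PySem.List.pySetD tbl a (pvRowUpd (PySem.List.pyGetD tbl a PySem.Dict.empty) a nbrs)).length : Int) := by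
      rw [PySem.List.length_pySetD]; exact hlen
    rw [ih hnd.of_cons (fun x hx => hbd x (List.mem_cons_of_mem _ hx)) _ hlen1]
    have hrow := pvRow_set tbl a u (pvRowUpd (PySem.List.pyGetD tbl a PySem.Dict.empty) a nbrs) ha0 hu0 hlen
    by_cases hua : u = a
    · have hnt : u ∉ t := by rw [hua]; exact (List.nodup_cons.mp hnd).1
      rw [if_neg hnt, hrow, if_pos hua, if_pos (by simp [hua])]
      rw [hua]; rfl
    · rw [hrow, if_neg hua]
      by_cases hut : u ∈ t
      · rw [if_pos hut, if_pos (by simp [hut])]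
      · rw [if_neg hut, if_neg (by simp [hua, hut])]

theorem pvMutualStep_row (adj : List (PySem.Set Int)) (n : Int) (hOK : pvAdjOK n adj)
    (m : Int) (hm0 : 0 ≤ m) (hm1 : m < n)
    (tbl : List (PySem.Dict Int Int)) (hlen : tbl.length = n.toNat)
    (u : Int) (hu0 : 0 ≤ u) (hu1 : u < n) :
    pvRow (pvMutualStep adj tbl m) u =
      if u ∈ pvAg adj m then pvRowUpd (pvRow tbl u) u (pvAg adj m) else pvRow tbl u := by
  have hmem := (hOK.2.1 m hm0 hm1)
  exact pvInner_row (pvAg adj m) u hu0 (pvAg adj m) hmem.1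
    (fun a ha => (hmem.2 a ha).1) tbl (by rw [hlen]; omega)

theorem pvRowUpd_getD (row : PySem.Dict Int Int) (u : Int) (nbrs : PySem.Set Int) (v : Int) :
    (pvRowUpd row u nbrs).getD v 0 =
      row.getD v 0 + ((nbrs.filter (fun b => decide (b ≠ u))).count v : Int) := by
  rw [pvRowUpd, ← PySem.Dict.getD_foldl_insert_add_one (nbrs.filter (fun b => decide (b ≠ u))) row v]
  rw [List.foldl_filter]
  simp only [decide_eq_true_eq]

theorem pvRowUpd_keys (row : PySem.Dict Int Int) (u : Int) (nbrs : PySem.Set Int) :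
    (pvRowUpd row u nbrs).keys =
      PySem.Set.update row.keys (nbrs.filter (fun b => decide (b ≠ u))) := by
  rw [pvRowUpd, ← PySem.Dict.keys_foldl_insert (nbrs.filter (fun b => decide (b ≠ u))) (fun d x => d.getD x 0 + 1) row]
  rw [List.foldl_filter]
  simp only [decide_eq_true_eq]

theorem pvMutual_rows_aux (adj : List (PySem.Set Int)) (n : Int) (hOK : pvAdjOK n adj)
    (u : Int) (hu0 : 0 ≤ u) (hu1 : u < n) :
    ∀ (ms : List Int), (∀ m ∈ ms, 0 ≤ m ∧ m < n) →
    ∀ (tbl : List (PySem.Dict Int Int)), tbl.length = n.toNat →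
      ((pvRow (ms.foldl (pvMutualStep adj) tbl) u).keys =
        PySem.Set.update (pvRow tbl u).keys
          (ms.flatMap (fun m => if u ∈ pvAg adj m then (pvAg adj m).filter (fun v => decide (v ≠ u)) else []))) ∧
      (∀ v, (pvRow (ms.foldl (pvMutualStep adj) tbl) u).getD v 0 =
        (pvRow tbl u).getD v 0 +
          ((ms.flatMap (fun m => if u ∈ pvAg adj m then (pvAg adj m).filter (fun v => decide (v ≠ u)) else [])).count v : Int)) := by
  intro ms
  induction ms with
  | nil => intro _ tbl _; simp
  | cons m t ih =>
    intro hms tbl hlen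
    have hm := hms m List.mem_cons_self
    have hrow := pvMutualStep_row adj n hOK m hm.1 hm.2 tbl hlen u hu0 hu1
    have hlen1 : (pvMutualStep adj tbl m).length = n.toNat := by
      rw [pvMutualStep_length]; exact hlen
    obtain ⟨ihk, ihg⟩ := ih (fun x hx => hms x (List.mem_cons_of_mem _ hx)) (pvMutualStep adj tbl m) hlen1
    rw [List.foldl_cons]
    constructor
    · rw [ihk, hrow, List.flatMap_cons, PySem.Set.update_append]
      by_cases h : u ∈ pvAg adj m
      · rw [if_pos h, if_pos h, pvRowUpd_keys]
      · rw [if_neg h, if_neg h]; rfl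
    · intro v
      rw [ihg v, hrow, List.flatMap_cons, List.count_append]
      by_cases h : u ∈ pvAg adj m
      · rw [if_pos h, if_pos h]
        show (pvRowUpd (pvRow tbl u) u (pvAg adj m)).getD v 0 + _ = _
        rw [pvRowUpd_getD]
        push_cast
        ring
      · rw [if_neg h, if_neg h]
        simp

theorem pvRow_replicate (n : Int) (u : Int) (hu0 : 0 ≤ u) (hu1 : u < n) :
    pvRow (List.replicate n.toNat PySem.Dict.empty) u = PySem.Dict.empty := by
  rw [pvRow, PySem.List.pyGetD_eq_getElem _ _ hu0 (by simp; omega), List.getElem_replicate]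

theorem pvMutual_rows (n : Int) (adj : List (PySem.Set Int)) (hOK : pvAdjOK n adj)
    (u : Int) (hu0 : 0 ≤ u) (hu1 : u < n) :
    ((pvRow ((PySem.List.pyRange 0 n 1).foldl (pvMutualStep adj)
        (List.replicate n.toNat PySem.Dict.empty)) u).keys = PySem.Set.ofList (pvTB adj n u)) ∧
    (∀ v, (pvRow ((PySem.List.pyRange 0 n 1).foldl (pvMutualStep adj)
        (List.replicate n.toNat PySem.Dict.empty)) u).getD v 0 = ((pvTB adj n u).count v : Int)) := by
  obtain ⟨hk, hg⟩ := pvMutual_rows_aux adj n hOK u hu0 hu1 (PySem.List.pyRange 0 n 1)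
    (fun m hm => by rw [PySem.List.mem_pyRange_one] at hm; exact hm)
    (List.replicate n.toNat PySem.Dict.empty) (by simp)
  rw [pvRow_replicate n u hu0 hu1] at hk hg
  constructor
  · rw [hk, PySem.Dict.keys_empty]; rfl
  · intro v; rw [hg v, PySem.Dict.getD_empty]; simp [pvTB]
theorem pvSelect_eq (n : Int) (adj : List (PySem.Set Int)) (hOK : pvAdjOK n adj)
    (u : Int) (hu0 : 0 ≤ u) (hu1 : u < n) :
    pvSelect adj ((PySem.List.pyRange 0 n 1).foldl (pvMutualStep adj)
        (List.replicate n.toNat PySem.Dict.empty)) u =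
      ((((PySem.Set.ofList (pvTB adj n u)).filter
            (fun v => decide (v ≠ u ∧ v ∉ pvAg adj u))).map
          (fun k => ((-((pvTB adj n u).count k : Int), k) : Int × Int))).foldl pvLexStep (0, -1)).2 := by
  obtain ⟨hk, hg⟩ := pvMutual_rows n adj hOK u hu0 hu1
  have hnd : (pvRow ((PySem.List.pyRange 0 n 1).foldl (pvMutualStep adj)
      (List.replicate n.toNat PySem.Dict.empty)) u).keys.Nodup := by
    rw [hk]; exact PySem.Set.nodup_ofList _
  have hitems := PySem.Dict.items_eq_map_keys _ hnd (0 : Int)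
  rw [hk] at hitems
  show ((pvRow ((PySem.List.pyRange 0 n 1).foldl (pvMutualStep adj)
      (List.replicate n.toNat PySem.Dict.empty)) u).items.foldl
    (fun (best : Int × Int) p =>
      if p.1 ≠ u ∧ p.1 ∉ PySem.List.pyGetD adj u PySem.Set.empty then
        (if -p.2 < best.1 ∨ (-p.2 = best.1 ∧ p.1 < best.2) then (-p.2, p.1) else best)
      else best) ((0 : Int), (-1 : Int))).2 = _
  rw [hitems]
  have hmapg : (PySem.Set.ofList (pvTB adj n u)).map
      (fun k => (k, (pvRow ((PySem.List.pyRange 0 n 1).foldl (pvMutualStep adj)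
        (List.replicate n.toNat PySem.Dict.empty)) u).getD k 0)) =
      (PySem.Set.ofList (pvTB adj n u)).map (fun k => (k, ((pvTB adj n u).count k : Int))) :=
    List.map_congr_left (fun k _ => by rw [hg k])
  rw [hmapg]
  congr 1
  rw [show (fun (best : Int × Int) (p : Int × Int) =>
        if p.1 ≠ u ∧ p.1 ∉ PySem.List.pyGetD adj u PySem.Set.empty then
          (if -p.2 < best.1 ∨ (-p.2 = best.1 ∧ p.1 < best.2) then (-p.2, p.1) else best)
        else best) = (fun (best : Int × Int) (p : Int × Int) =>
        if (decide (p.1 ≠ u ∧ p.1 ∉ pvAg adj u)) = true then pvLexStep best (-p.2, p.1) else best) from by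
      funext best p; simp [pvLexStep, pvAg]]
  rw [← List.foldl_filter]
  rw [List.filter_map]
  rw [List.foldl_map]
  rw [show ((fun (p : Int × Int) => decide (p.1 ≠ u ∧ p.1 ∉ pvAg adj u)) ∘
      (fun k => ((k, ((pvTB adj n u).count k : Int)) : Int × Int))) =
      (fun v => decide (v ≠ u ∧ v ∉ pvAg adj u)) from by funext k; rfl]
  rw [List.foldl_map]

theorem pvFriend_iff (n : Int) (adj : List (PySem.Set Int)) (hOK : pvAdjOK n adj)
    (u : Int) (hu0 : 0 ≤ u) (hu1 : u < n) (m : Int) :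
    m ∈ pvAg adj u ↔ (0 ≤ m ∧ m < n ∧ u ∈ pvAg adj m) := by
  constructor
  · intro h
    have hb := (hOK.2.1 u hu0 hu1).2 m h
    exact ⟨hb.1, hb.2, (hOK.2.2 u m hu0 hu1 hb.1 hb.2).mp h⟩
  · intro ⟨h0, h1, h2⟩
    exact (hOK.2.2 u m hu0 hu1 h0 h1).mpr h2

theorem pvTB_mem_iff (n : Int) (adj : List (PySem.Set Int))
    (u v : Int) : v ∈ pvTB adj n u ↔ ∃ m, 0 ≤ m ∧ m < n ∧ u ∈ pvAg adj m ∧ v ∈ pvAg adj m ∧ v ≠ u := by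
  rw [pvTB, List.mem_flatMap]
  constructor
  · rintro ⟨m, hm, hv⟩
    rw [PySem.List.mem_pyRange_one] at hm
    by_cases h : u ∈ pvAg adj m
    · rw [if_pos h, List.mem_filter, decide_eq_true_eq] at hv
      exact ⟨m, hm.1, hm.2, h, hv.1, hv.2⟩
    · rw [if_neg h] at hv; simp at hv
  · rintro ⟨m, h0, h1, h2, h3, h4⟩
    refine ⟨m, PySem.List.mem_pyRange_one.mpr ⟨h0, h1⟩, ?_⟩
    rw [if_pos h2, List.mem_filter, decide_eq_true_eq]
    exact ⟨h3, h4⟩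

theorem pvTB_mem_bounds (n : Int) (adj : List (PySem.Set Int)) (hOK : pvAdjOK n adj)
    (u v : Int) (hv : v ∈ pvTB adj n u) : 0 ≤ v ∧ v < n := by
  obtain ⟨m, h0, h1, _, h3, _⟩ := (pvTB_mem_iff n adj u v).mp hv
  exact (hOK.2.1 m h0 h1).2 v h3

theorem pvSA_mem_iff (n : Int) (adj : List (PySem.Set Int)) (hOK : pvAdjOK n adj)
    (u : Int) (hu0 : 0 ≤ u) (hu1 : u < n) (v : Int) :
    v ∈ pvSA adj u ↔ (v ∈ pvTB adj n u ∧ v ≠ u ∧ v ∉ pvAg adj u) := by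
  rw [pvSA, List.mem_flatMap, pvTB_mem_iff n adj u v]
  constructor
  · rintro ⟨m, hm, hv⟩
    rw [List.mem_filter, decide_eq_true_eq] at hv
    obtain ⟨hmb, hmn, hum⟩ := (pvFriend_iff n adj hOK u hu0 hu1 m).mp hm
    exact ⟨⟨m, hmb, hmn, hum, hv.1, hv.2.1⟩, hv.2⟩
  · rintro ⟨⟨m, h0, h1, h2, h3, h4⟩, h5, h6⟩
    refine ⟨m, (pvFriend_iff n adj hOK u hu0 hu1 m).mpr ⟨h0, h1, h2⟩, ?_⟩
    rw [List.mem_filter, decide_eq_true_eq]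
    exact ⟨h3, h5, h6⟩

theorem pvCount_nodup (l : List Int) (h : l.Nodup) (v : Int) :
    l.count v = if v ∈ l then 1 else 0 := by
  by_cases hv : v ∈ l
  · rw [if_pos hv]
    exact le_antisymm (List.nodup_iff_count_le_one.mp h v) (List.count_pos_iff.mpr hv)
  · rw [if_neg hv, List.count_eq_zero]; exact hv

theorem pvSA_count_eq (n : Int) (adj : List (PySem.Set Int)) (hOK : pvAdjOK n adj)
    (u : Int) (hu0 : 0 ≤ u) (hu1 : u < n) (v : Int) (hv : v ∈ pvSA adj u) :
    (pvSA adj u).count v = (pvTB adj n u).count v := by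
  obtain ⟨hvTB, hvne, hvnf⟩ := (pvSA_mem_iff n adj hOK u hu0 hu1 v).mp hv
  have hSA : (pvSA adj u).count v =
      (pvAg adj u).countP (fun m => decide (v ∈ pvAg adj m)) := by
    rw [pvSA, List.count_flatMap]
    rw [List.map_congr_left (l := pvAg adj u)
      (g := fun m => if (fun m => decide (v ∈ pvAg adj m)) m = true then 1 else 0) ?_]
    · exact PySem.List.sum_map_ite_one_zero_nat _ _
    · intro m hm
      obtain ⟨hm0, hm1⟩ := (hOK.2.1 u hu0 hu1).2 m hm
      show List.count v (List.filter _ _) = _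
      rw [List.count_filter (by simp [hvne, hvnf])]
      rw [pvCount_nodup _ (hOK.2.1 m hm0 hm1).1 v]
      simp
  have hTB : (pvTB adj n u).count v =
      (PySem.List.pyRange 0 n 1).countP (fun m => decide (u ∈ pvAg adj m ∧ v ∈ pvAg adj m)) := by
    rw [pvTB, List.count_flatMap]
    rw [List.map_congr_left (l := PySem.List.pyRange 0 n 1)
      (g := fun m => if (fun m => decide (u ∈ pvAg adj m ∧ v ∈ pvAg adj m)) m = true then 1 else 0) ?_]
    · exact PySem.List.sum_map_ite_one_zero_nat _ _
    · intro m hm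
      rw [PySem.List.mem_pyRange_one] at hm
      show List.count v (if u ∈ pvAg adj m then _ else _) = _
      by_cases h : u ∈ pvAg adj m
      · rw [if_pos h, List.count_filter (by simp [hvne])]
        rw [pvCount_nodup _ (hOK.2.1 m hm.1 hm.2).1 v]
        simp [h]
      · rw [if_neg h]
        simp [h]
  rw [hSA, hTB]
  have hperm : (pvAg adj u).Perm
      ((PySem.List.pyRange 0 n 1).filter (fun m => decide (u ∈ pvAg adj m))) := by
    rw [List.perm_ext_iff_of_nodup (hOK.2.1 u hu0 hu1).1
      (List.Nodup.filter _ (PySem.List.nodup_pyRange_one 0 n))]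
    intro m
    rw [List.mem_filter, PySem.List.mem_pyRange_one, decide_eq_true_eq,
      pvFriend_iff n adj hOK u hu0 hu1 m]
    tauto
  rw [hperm.countP_eq, List.countP_filter]
  apply List.countP_congr
  intro m _
  simp only [Bool.and_eq_true, decide_eq_true_eq]
  tauto

theorem pvBuildAdj_eq (n : Int) (fs : List (List Int)) : pvBuildAdjB n fs = pvBuildAdjA n fs := rfl

-- ===== VERDICT (by name: the statement is the Claim_ definition above) =====
theorem getRecommendedFriends_spec : Claim_equal_getRecommendedFriends := by
  intro n fs _hdom hpre
  unfold Spec_getRecommendedFriends getRecommendedFriends getRecommendedFriends_alt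
  rw [pvBuildAdj_eq]
  apply List.map_congr_left
  intro u hu
  rw [PySem.List.mem_pyRange_one] at hu
  have hOK := pvAdjOK_build n fs hpre
  set adj := pvBuildAdjA n fs with hadj
  rw [pvSearchFriend_eq, pvSelect_eq n adj hOK u hu.1 hu.2]
  have hcnt : ∀ k ∈ (PySem.Set.ofList (pvTB adj n u)).filter
      (fun v => decide (v ≠ u ∧ v ∉ pvAg adj u)),
      ((-((pvTB adj n u).count k : Int), k) : Int × Int) = (-((pvSA adj u).count k : Int), k) := by
    intro k hk
    rw [List.mem_filter, PySem.Set.mem_ofList, decide_eq_true_eq] at hk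
    have hkSA : k ∈ pvSA adj u := (pvSA_mem_iff n adj hOK u hu.1 hu.2 k).mpr ⟨hk.1, hk.2⟩
    rw [pvSA_count_eq n adj hOK u hu.1 hu.2 k hkSA]
  have hperm : ((PySem.Set.ofList (pvSA adj u)).map
        (fun k => ((-((pvSA adj u).count k : Int), k) : Int × Int))).Perm
      (((PySem.Set.ofList (pvTB adj n u)).filter
          (fun v => decide (v ≠ u ∧ v ∉ pvAg adj u))).map
        (fun k => ((-((pvTB adj n u).count k : Int), k) : Int × Int))) := by
    rw [List.map_congr_left hcnt]
    apply List.Perm.map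
    rw [List.perm_ext_iff_of_nodup (PySem.Set.nodup_ofList _)
      (List.Nodup.filter _ (PySem.Set.nodup_ofList _))]
    intro v
    rw [List.mem_filter, PySem.Set.mem_ofList, PySem.Set.mem_ofList, decide_eq_true_eq]
    exact (pvSA_mem_iff n adj hOK u hu.1 hu.2 v).trans (by tauto)
  rw [pvLexFold_perm _ _ hperm]
  set M := (((PySem.Set.ofList (pvTB adj n u)).filter
      (fun v => decide (v ≠ u ∧ v ∉ pvAg adj u))).map
    (fun k => ((-((pvTB adj n u).count k : Int), k) : Int × Int))) with hM
  rcases pvLexFold_mem M (0, -1) with h | h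
  · rw [h]; norm_num
  · have h2 : 0 ≤ (M.foldl pvLexStep (0, -1)).2 := by
      rw [hM] at h
      rcases List.mem_map.mp h with ⟨k, hk, hke⟩
      rw [List.mem_filter, PySem.Set.mem_ofList] at hk
      have := pvTB_mem_bounds n adj hOK u k hk.1
      rw [← hke]; exact this.1
    simp [h2]
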